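-- pv_equiv track=rewrite | github.com/xbmc/repo-plugins | plugin.program.AML/resources/mame_misc.py | mame_catalog_key_Devices_Compact
-- ===== SOURCE A (Python) =====
-- def misc_improve_mame_device_list(control_type_list):
--     out_list = []
--     for control_str in control_type_list: out_list.append(control_str.title())
--
--     return out_list
--
-- def misc_compress_mame_item_list_compact(item_list):
--     num_items = len(item_list)
--     if num_items == 0 or num_items == 1: return item_list
--     item_set = set(item_list)
--     reduced_list = list(item_set)
--     reduced_list_sorted = sorted(reduced_list)
--
--     return reduced_list_sorted
--
-- def mame_catalog_key_Devices_Compact(parent_name, machines, machines_render):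
--     machine = machines[parent_name]
--     machine_render = machines_render[parent_name]
--     # Order alphabetically the list
--     device_list = [ device['att_type'] for device in machine['devices'] ]
--     pretty_device_list = misc_improve_mame_device_list(device_list)
--     sorted_device_list = sorted(pretty_device_list)
--     compressed_device_list = misc_compress_mame_item_list_compact(sorted_device_list)
--     if not compressed_device_list:
--         compressed_device_list = [ '[ No devices ]' ]
--
--     return compressed_device_list
-- ===== SOURCE B (Python) =====
-- def mame_catalog_key_Devices_Compact(parent_name, machines, machines_render):
--     machine = machines[parent_name]
--     machines_render[parent_name]
--     titles = sorted(device['att_type'].title() for device in machine['devices'])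
--     out = []
--     prev = None
--     for t in titles:
--         if t != prev:
--             out.append(t)
--             prev = t
--     return out if out else ['[ No devices ]']
-- ===== Notes on version B (the rewrite author's own statement) =====
-- stated objective: simpler
-- what changed: B inlines the pipeline into one pass: title-case, sort once, then deduplicate by a linear scan over the sorted list comparing each element with the previously kept one, instead of A's helper chain that sorts, builds a hash set, re-lists it and sorts again.
import Mathlib
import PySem

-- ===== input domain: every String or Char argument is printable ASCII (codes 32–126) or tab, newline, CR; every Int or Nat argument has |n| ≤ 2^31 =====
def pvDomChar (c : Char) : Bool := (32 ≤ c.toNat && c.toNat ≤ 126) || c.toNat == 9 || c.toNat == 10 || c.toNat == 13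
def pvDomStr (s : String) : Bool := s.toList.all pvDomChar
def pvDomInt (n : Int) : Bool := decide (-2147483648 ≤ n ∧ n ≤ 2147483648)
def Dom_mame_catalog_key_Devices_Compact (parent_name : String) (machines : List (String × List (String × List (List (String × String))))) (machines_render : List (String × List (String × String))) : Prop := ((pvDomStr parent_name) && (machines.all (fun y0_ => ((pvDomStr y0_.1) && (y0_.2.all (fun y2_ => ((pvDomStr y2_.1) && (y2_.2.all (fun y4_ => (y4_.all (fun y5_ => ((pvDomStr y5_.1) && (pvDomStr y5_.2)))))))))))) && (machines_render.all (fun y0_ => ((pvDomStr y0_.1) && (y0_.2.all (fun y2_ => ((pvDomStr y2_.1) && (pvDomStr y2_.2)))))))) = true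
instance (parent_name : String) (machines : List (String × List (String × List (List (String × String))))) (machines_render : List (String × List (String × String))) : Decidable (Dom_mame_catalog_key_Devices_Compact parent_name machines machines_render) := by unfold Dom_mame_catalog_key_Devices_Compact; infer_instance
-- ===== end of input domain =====

-- B replaces A's sort / set / re-sort helper chain by one sort plus a linear adjacent-dedup scan
-- (same return value, proved equal below); B keeps A's otherwise-unused machines_render lookup.

-- first-match association-list lookup (Python dict subscript on our dict encoding; none = KeyError)
def pvLookup {β : Type} (l : List (String × β)) (k : String) : Option β :=
  (l.find? (fun p => p.1 == k)).map (fun p => p.2)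

-- str.title(), hand-ported (no PySem primitive): a character is uppercased when the previous
-- character is not a letter, else lowercased — exact on the ASCII domain, where Python's
-- "cased character" notion coincides with isalpha.
def pvTitleChars : List Char → Bool → List Char
  | [], _ => []
  | c :: rest, prevAlpha =>
      (if prevAlpha then PySem.Chars.lowerChar c else PySem.Chars.upperChar c)
        :: pvTitleChars rest (PySem.Chars.isalpha c)

def pvTitle (s : String) : String := String.ofList (pvTitleChars s.toList false)

-- ===== PORT A =====
def misc_improve_mame_device_list (control_type_list : List String) : List String :=
  control_type_list.foldl (fun out_list control_str => out_list ++ [pvTitle control_str]) []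

def misc_compress_mame_item_list_compact (item_list : List String) : List String :=
  let num_items := item_list.length
  if num_items = 0 ∨ num_items = 1 then item_list
  else
    let item_set := PySem.Set.ofList item_list
    let reduced_list := item_set
    PySem.List.sorted reduced_list (fun x => x) false

def mame_catalog_key_Devices_Compact (parent_name : String) (machines : List (String × List (String × List (List (String × String))))) (machines_render : List (String × List (String × String))) : List String :=
  -- the KeyError-raising subscripts are made total with getD; Pre_ excludes the raising inputs
  let machine := (pvLookup machines parent_name).getD []
  let _machine_render := (pvLookup machines_render parent_name).getD []
  let device_list := ((pvLookup machine "devices").getD []).map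
    (fun device => (pvLookup device "att_type").getD "")
  let pretty_device_list := misc_improve_mame_device_list device_list
  let sorted_device_list := PySem.List.sorted pretty_device_list (fun x => x) false
  let compressed_device_list := misc_compress_mame_item_list_compact sorted_device_list
  if compressed_device_list = [] then ["[ No devices ]"] else compressed_device_list

-- ===== PORT B =====
def mame_catalog_key_Devices_Compact_alt (parent_name : String) (machines : List (String × List (String × List (List (String × String))))) (machines_render : List (String × List (String × String))) : List String :=
  let machine := (pvLookup machines parent_name).getD []
  let _machine_render := (pvLookup machines_render parent_name).getD []
  let titles := PySem.List.sorted
    (((pvLookup machine "devices").getD []).map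
      (fun device => pvTitle ((pvLookup device "att_type").getD "")))
    (fun x => x) false
  -- linear scan over the sorted list: keep t only when it differs from the previously kept one
  let res := titles.foldl
    (fun (acc : List String × Option String) t =>
      if acc.2 ≠ some t then (acc.1 ++ [t], some t) else acc)
    (([] : List String), (none : Option String))
  if res.1 = [] then ["[ No devices ]"] else res.1

-- ===== PRECONDITION & SPEC =====
-- Pre_ excludes exactly the inputs on which the Python A raises KeyError: parent_name missing
-- from machines or machines_render, the machine lacking 'devices', or a device lacking 'att_type'.
def Pre_mame_catalog_key_Devices_Compact (parent_name : String) (machines : List (String × List (String × List (List (String × String))))) (machines_render : List (String × List (String × String))) : Prop :=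
  ((pvLookup machines parent_name).bind (fun machine => pvLookup machine "devices")).isSome = true ∧
  (pvLookup machines_render parent_name).isSome = true ∧
  ∀ d ∈ ((pvLookup machines parent_name).bind (fun machine => pvLookup machine "devices")).getD [],
    (pvLookup d "att_type").isSome = true
instance (parent_name : String) (machines : List (String × List (String × List (List (String × String))))) (machines_render : List (String × List (String × String))) : Decidable (Pre_mame_catalog_key_Devices_Compact parent_name machines machines_render) := by unfold Pre_mame_catalog_key_Devices_Compact; infer_instance

def pvWitness_mame_catalog_key_Devices_Compact : String × (List (String × List (String × List (List (String × String))))) × (List (String × List (String × String))) :=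
  ("m", [("m", [("devices", [[("att_type", "joy")], [("att_type", "kbd")], [("att_type", "joy")]])])], [("m", [("desc", "x")])])

def Spec_mame_catalog_key_Devices_Compact (parent_name : String) (machines : List (String × List (String × List (List (String × String))))) (machines_render : List (String × List (String × String))) (out : List String) : Prop := out = mame_catalog_key_Devices_Compact_alt parent_name machines machines_render
instance (parent_name : String) (machines : List (String × List (String × List (List (String × String))))) (machines_render : List (String × List (String × String))) (out : List String) : Decidable (Spec_mame_catalog_key_Devices_Compact parent_name machines machines_render out) := by unfold Spec_mame_catalog_key_Devices_Compact; infer_instance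

-- ===== CLAIM (what is proved, stated in full; the proofs are below) =====
def Claim_equal_mame_catalog_key_Devices_Compact : Prop := ∀ (parent_name : String) (machines : List (String × List (String × List (List (String × String))))) (machines_render : List (String × List (String × String))), Dom_mame_catalog_key_Devices_Compact parent_name machines machines_render → Pre_mame_catalog_key_Devices_Compact parent_name machines machines_render → Spec_mame_catalog_key_Devices_Compact parent_name machines machines_render (mame_catalog_key_Devices_Compact parent_name machines machines_render)

-- ===== LEMMAS AND PROOFS =====

-- recursive description of B's dedup scan
def pvDedupFrom (prev : String) : List String → List String
  | [] => []
  | b :: l => if b = prev then pvDedupFrom prev l else b :: pvDedupFrom b l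

def pvDedup : List String → List String
  | [] => []
  | a :: l => a :: pvDedupFrom a l

lemma foldl_scan_from (l : List String) : ∀ (out : List String) (prev : String),
    (l.foldl (fun (acc : List String × Option String) t =>
        if acc.2 ≠ some t then (acc.1 ++ [t], some t) else acc) (out, some prev)).1
      = out ++ pvDedupFrom prev l := by
  induction l with
  | nil => intro out prev; simp [pvDedupFrom]
  | cons b l ih =>
    intro out prev
    by_cases h : b = prev
    · subst h
      rw [List.foldl_cons]
      have hnn : ¬ ((some b : Option String) ≠ some b) := by simp
      rw [if_neg hnn, ih]
      simp [pvDedupFrom]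
    · simp only [List.foldl_cons, pvDedupFrom, if_neg h]
      have hne : (some prev ≠ some b) := by simpa using (Ne.symm h)
      simp only [if_pos hne]
      rw [ih]
      simp

lemma foldl_scan (l : List String) :
    (l.foldl (fun (acc : List String × Option String) t =>
        if acc.2 ≠ some t then (acc.1 ++ [t], some t) else acc)
        (([] : List String), (none : Option String))).1 = pvDedup l := by
  cases l with
  | nil => simp [pvDedup]
  | cons a l =>
    simp only [List.foldl_cons]
    have : ((none : Option String) ≠ some a) := by simp
    simp only [if_pos this]
    rw [foldl_scan_from]
    simp [pvDedup]

lemma dedupFrom_strong (l : List String) : ∀ (prev : String),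
    l.Pairwise (· ≤ ·) → (∀ x ∈ l, prev ≤ x) →
    (∀ x, x ∈ pvDedupFrom prev l ↔ (x ∈ l ∧ x ≠ prev)) ∧
    (pvDedupFrom prev l).Pairwise (· < ·) ∧
    (∀ x ∈ pvDedupFrom prev l, prev < x) := by
  induction l with
  | nil => intro prev _ _; simp [pvDedupFrom]
  | cons b l ih =>
    intro prev hpw hge
    have hpl : l.Pairwise (· ≤ ·) := hpw.of_cons
    have hble : ∀ x ∈ l, b ≤ x := fun x hx => (List.pairwise_cons.mp hpw).1 x hx
    by_cases h : b = prev
    · subst h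
      have ⟨hmem, hpd, hlt⟩ := ih b hpl hble
      refine ⟨?_, ?_, ?_⟩
      · intro x
        rw [pvDedupFrom, if_pos rfl, hmem x]
        constructor
        · rintro ⟨hx, hne⟩; exact ⟨List.mem_cons_of_mem _ hx, hne⟩
        · rintro ⟨hx, hne⟩
          rcases List.mem_cons.mp hx with h' | h'
          · exact absurd h' hne
          · exact ⟨h', hne⟩
      · rw [pvDedupFrom, if_pos rfl]; exact hpd
      · rw [pvDedupFrom, if_pos rfl]; exact hlt
    · have hpb : prev < b := lt_of_le_of_ne (hge b (List.mem_cons_self)) (Ne.symm h)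
      have ⟨hmem, hpd, hlt⟩ := ih b hpl hble
      refine ⟨?_, ?_, ?_⟩
      · intro x
        rw [pvDedupFrom, if_neg h, List.mem_cons]
        constructor
        · rintro (rfl | hx)
          · exact ⟨List.mem_cons_self, h⟩
          · obtain ⟨hxl, _⟩ := (hmem x).mp hx
            have : prev < x := lt_of_lt_of_le hpb (hble x hxl)
            exact ⟨List.mem_cons_of_mem _ hxl, ne_of_gt this⟩
        · rintro ⟨hx, hne⟩
          rcases List.mem_cons.mp hx with h' | h'
          · exact Or.inl h'
          · by_cases hxb : x = b
            · exact Or.inl hxb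
            · exact Or.inr ((hmem x).mpr ⟨h', hxb⟩)
      · rw [pvDedupFrom, if_neg h]
        exact List.pairwise_cons.mpr ⟨hlt, hpd⟩
      · rw [pvDedupFrom, if_neg h]
        intro x hx
        rcases List.mem_cons.mp hx with rfl | hx'
        · exact hpb
        · exact lt_trans hpb (hlt x hx')

lemma dedup_sorted_props (l : List String) (hpw : l.Pairwise (· ≤ ·)) :
    (∀ x, x ∈ pvDedup l ↔ x ∈ l) ∧ (pvDedup l).Pairwise (· < ·) := by
  cases l with
  | nil => simp [pvDedup]
  | cons a l =>
    have hpl : l.Pairwise (· ≤ ·) := hpw.of_cons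
    have hale : ∀ x ∈ l, a ≤ x := fun x hx => (List.pairwise_cons.mp hpw).1 x hx
    have ⟨hmem, hpd, hlt⟩ := dedupFrom_strong l a hpl hale
    constructor
    · intro x
      rw [pvDedup, List.mem_cons, hmem x, List.mem_cons]
      constructor
      · rintro (rfl | ⟨hx, _⟩)
        · exact Or.inl rfl
        · exact Or.inr hx
      · rintro (rfl | hx)
        · exact Or.inl rfl
        · by_cases hxa : x = a
          · exact Or.inl hxa
          · exact Or.inr ⟨hx, hxa⟩
    · exact List.pairwise_cons.mpr ⟨hlt, hpd⟩

-- A's compress of a sorted list equals B's adjacent-dedup of it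
lemma compress_eq_dedup (xs : List String) :
    misc_compress_mame_item_list_compact (PySem.List.sorted xs (fun x => x) false)
      = pvDedup (PySem.List.sorted xs (fun x => x) false) := by
  set l := PySem.List.sorted xs (fun x => x) false with hl
  have hpw : l.Pairwise (· ≤ ·) := by
    have := PySem.List.sorted_pairwise (xs := xs) (key := fun x => x)
    simpa [hl] using this
  match hm : l with
  | [] => simp [misc_compress_mame_item_list_compact, pvDedup]
  | [a] => simp [misc_compress_mame_item_list_compact, pvDedup, pvDedupFrom]
  | a :: b :: t =>
    rw [← hm] at hpw ⊢
    have hlen : ¬ (l.length = 0 ∨ l.length = 1) := by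
      rw [hm]; simp
    have ⟨hmem, hpd⟩ := dedup_sorted_props l hpw
    have hnd : (pvDedup l).Nodup := hpd.imp (fun h => ne_of_lt h)
    have hperm : (pvDedup l).Perm (PySem.Set.ofList l) := by
      rw [List.perm_ext_iff_of_nodup hnd (PySem.Set.nodup_ofList l)]
      intro x
      rw [hmem x, PySem.Set.mem_ofList]
    have := PySem.List.sorted_eq_of_perm_of_pairwise_lt
      (xs := PySem.Set.ofList l) (ys := pvDedup l) (key := fun x => x) hperm (by simpa using hpd)
    simp only [misc_compress_mame_item_list_compact, if_neg hlen]
    exact this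

lemma improve_eq_map (l : List String) :
    misc_improve_mame_device_list l = l.map pvTitle := by
  unfold misc_improve_mame_device_list
  suffices h : ∀ acc : List String,
      l.foldl (fun out s => out ++ [pvTitle s]) acc = acc ++ l.map pvTitle by
    simpa using h []
  induction l with
  | nil => intro acc; simp
  | cons a l ih => intro acc; simp [ih]

-- ===== VERDICT (by name: the statement is the Claim_ definition above) =====
theorem mame_catalog_key_Devices_Compact_spec : Claim_equal_mame_catalog_key_Devices_Compact := by
  intro parent_name machines machines_render _ _
  unfold Spec_mame_catalog_key_Devices_Compact
  unfold mame_catalog_key_Devices_Compact mame_catalog_key_Devices_Compact_alt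
  simp only [foldl_scan, improve_eq_map, List.map_map]
  rw [compress_eq_dedup]
  rfl
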